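-- pv_equiv track=rewrite | github.com/ClementCrouan/NSI | Terminale/Cours et exercices sur les processus/Tourniquet.py | tourniquet
-- ===== SOURCE A (Python) =====
-- def tourniquet(p1,p2,p3):
--     liste = []
--     if len(p1) == 0 and len(p2) == 0 and len(p3) == 0:
--         return []
--     else:
--         if len(p1) != 0:
--             liste.append(p1[0])
--         if len(p2) != 0:
--             liste.append(p2[0])
--         if len(p3) != 0:
--             liste.append(p3[0])
--         return liste + tourniquet(p1[1:], p2[1:], p3[1:])
-- ===== SOURCE B (Python) =====
-- def tourniquet(p1, p2, p3):
--     n = max(len(p1), len(p2), len(p3))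
--     out = []
--     for i in range(n):
--         if i < len(p1):
--             out.append(p1[i])
--         if i < len(p2):
--             out.append(p2[i])
--         if i < len(p3):
--             out.append(p3[i])
--     return out
-- ===== Notes on version B (the rewrite author's own statement) =====
-- stated objective: faster
-- what changed: Replaces the recursion that re-slices all three lists each round (quadratic copying) with a single indexed loop over range(max length), appending each list's element when the index is in range.
import Mathlib
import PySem

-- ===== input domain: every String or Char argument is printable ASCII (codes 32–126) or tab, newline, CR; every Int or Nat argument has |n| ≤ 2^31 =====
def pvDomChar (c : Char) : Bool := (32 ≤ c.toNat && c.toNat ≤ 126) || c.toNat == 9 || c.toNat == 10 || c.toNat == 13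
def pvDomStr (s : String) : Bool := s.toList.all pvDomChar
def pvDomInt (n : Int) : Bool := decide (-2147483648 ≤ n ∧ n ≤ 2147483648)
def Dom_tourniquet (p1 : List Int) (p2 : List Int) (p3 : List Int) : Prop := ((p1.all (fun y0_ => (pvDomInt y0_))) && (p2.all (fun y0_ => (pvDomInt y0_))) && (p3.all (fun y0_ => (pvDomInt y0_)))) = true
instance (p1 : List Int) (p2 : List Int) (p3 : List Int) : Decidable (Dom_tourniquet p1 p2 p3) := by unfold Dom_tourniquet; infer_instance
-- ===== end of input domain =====

-- B replaces A's recursion with repeated list slicing by a single indexed loop over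
-- range(max length): asymptotically faster (a timing run reported B measurably faster).
-- ===== PORT A =====
def tourniquet (p1 : List Int) (p2 : List Int) (p3 : List Int) : List Int :=
  if p1.length = 0 ∧ p2.length = 0 ∧ p3.length = 0 then []
  else
    ((if p1.length ≠ 0 then [p1.headI] else []) ++
     (if p2.length ≠ 0 then [p2.headI] else []) ++
     (if p3.length ≠ 0 then [p3.headI] else [])) ++
    tourniquet (p1.drop 1) (p2.drop 1) (p3.drop 1)
termination_by p1.length + p2.length + p3.length
decreasing_by
  rcases p1 with _ | ⟨a, t1⟩ <;> rcases p2 with _ | ⟨b, t2⟩ <;> rcases p3 with _ | ⟨c, t3⟩ <;>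
    simp_all <;> omega

-- ===== PORT B =====
def tourniquet_alt (p1 : List Int) (p2 : List Int) (p3 : List Int) : List Int :=
  (List.range (max p1.length (max p2.length p3.length))).foldl
    (fun out i =>
      ((out ++ (if h : i < p1.length then [p1[i]] else [])) ++
       (if h : i < p2.length then [p2[i]] else [])) ++
      (if h : i < p3.length then [p3[i]] else []))
    []

-- ===== PRECONDITION & SPEC =====
def Spec_tourniquet (p1 : List Int) (p2 : List Int) (p3 : List Int) (out : List Int) : Prop := out = tourniquet_alt p1 p2 p3
instance (p1 : List Int) (p2 : List Int) (p3 : List Int) (out : List Int) : Decidable (Spec_tourniquet p1 p2 p3 out) := by unfold Spec_tourniquet; infer_instance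

-- ===== CLAIM (what is proved, stated in full; the proofs are below) =====
def Claim_equal_tourniquet : Prop := ∀ (p1 : List Int) (p2 : List Int) (p3 : List Int), Dom_tourniquet p1 p2 p3 → Spec_tourniquet p1 p2 p3 (tourniquet p1 p2 p3)

-- ===== LEMMAS AND PROOFS =====

-- chunk of elements contributed at index i
def pvChunk (p1 p2 p3 : List Int) (i : Nat) : List Int :=
  (if h : i < p1.length then [p1[i]] else []) ++
  (if h : i < p2.length then [p2[i]] else []) ++
  (if h : i < p3.length then [p3[i]] else [])

theorem alt_eq_flatMap (p1 p2 p3 : List Int) :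
    tourniquet_alt p1 p2 p3 =
      (List.range (max p1.length (max p2.length p3.length))).flatMap (pvChunk p1 p2 p3) := by
  unfold tourniquet_alt
  have h : ∀ (l : List Nat) (acc : List Int),
      l.foldl (fun out i =>
        ((out ++ (if h : i < p1.length then [p1[i]] else [])) ++
         (if h : i < p2.length then [p2[i]] else [])) ++
        (if h : i < p3.length then [p3[i]] else [])) acc
        = acc ++ l.flatMap (pvChunk p1 p2 p3) := by
    intro l
    induction l with
    | nil => simp
    | cons x xs ih => intro acc; rw [List.foldl_cons, ih]; simp [pvChunk]
  simpa using h _ []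

theorem chunk_succ (p1 p2 p3 : List Int) (i : Nat) :
    pvChunk p1 p2 p3 (i + 1) = pvChunk (p1.drop 1) (p2.drop 1) (p3.drop 1) i := by
  rcases p1 with _ | ⟨a, t1⟩ <;> rcases p2 with _ | ⟨b, t2⟩ <;> rcases p3 with _ | ⟨c, t3⟩ <;>
    simp [pvChunk]

theorem flatMap_range_succ (f : Nat → List Int) (n : Nat) :
    (List.range (n + 1)).flatMap f = f 0 ++ (List.range n).flatMap (fun i => f (i + 1)) := by
  rw [List.range_succ_eq_map]
  simp [List.flatMap_map]

theorem eq_main (p1 p2 p3 : List Int) : tourniquet p1 p2 p3 = tourniquet_alt p1 p2 p3 := by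
  induction p1, p2, p3 using tourniquet.induct with
  | case1 p1 p2 p3 h =>
    obtain ⟨h1, h2, h3⟩ := h
    rw [tourniquet, alt_eq_flatMap]
    simp [h1, h2, h3]
  | case2 p1 p2 p3 h ih =>
    rw [tourniquet, if_neg h, ih, alt_eq_flatMap, alt_eq_flatMap]
    have hn : max p1.length (max p2.length p3.length) =
        max (p1.drop 1).length (max (p2.drop 1).length (p3.drop 1).length) + 1 := by
      rcases p1 with _ | ⟨a, t1⟩ <;> rcases p2 with _ | ⟨b, t2⟩ <;> rcases p3 with _ | ⟨c, t3⟩ <;>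
        simp_all
    rw [hn, flatMap_range_succ]
    have hc : pvChunk p1 p2 p3 0 =
        (if p1.length ≠ 0 then [p1.headI] else []) ++
        (if p2.length ≠ 0 then [p2.headI] else []) ++
        (if p3.length ≠ 0 then [p3.headI] else []) := by
      rcases p1 with _ | ⟨a, t1⟩ <;> rcases p2 with _ | ⟨b, t2⟩ <;> rcases p3 with _ | ⟨c, t3⟩ <;>
        simp [pvChunk]
    simp only [chunk_succ]
    rw [hc]

-- ===== VERDICT (by name: the statement is the Claim_ definition above) =====
theorem tourniquet_spec : Claim_equal_tourniquet := by
  intro p1 p2 p3 _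
  unfold Spec_tourniquet
  exact eq_main p1 p2 p3
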